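-- pv_equiv track=rewrite | github.com/dabaez/FOIL-Prototype | exp.py | replace_constants
-- ===== SOURCE A (Python) =====
-- def replace_constants(q , cs, dim):
--     nq = ""
--     idx = 0
--     for l in q:
--         if l == 'C':
--             nq += " [ "
--             for j in range(dim):
--                 if (j): nq += " , "
--                 if (cs[idx][j] == 2): nq += " ? "
--                 else: nq += str(cs[idx][j])
--             nq += " ] "
--             idx+=1
--         else: nq += l
--     return nq
-- ===== SOURCE B (Python) =====
-- def replace_constants(q, cs, dim):
--     parts = q.split('C')
--     n = len(parts) - 1
--     blocks = [" [ " + " , ".join(" ? " if cs[i][j] == 2 else str(cs[i][j]) for j in range(dim)) + " ] "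
--               for i in range(n)]
--     out = [parts[0]]
--     for i in range(n):
--         out.append(blocks[i])
--         out.append(parts[i + 1])
--     return "".join(out)
-- ===== Notes on version B (the rewrite author's own statement) =====
-- stated objective: idiomatic
-- what changed: Replaces A's character-by-character scan with a running constant index by splitting the query on 'C', rendering each needed constant block with ' , '.join, and interleaving the text segments with the rendered blocks.
import Mathlib
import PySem

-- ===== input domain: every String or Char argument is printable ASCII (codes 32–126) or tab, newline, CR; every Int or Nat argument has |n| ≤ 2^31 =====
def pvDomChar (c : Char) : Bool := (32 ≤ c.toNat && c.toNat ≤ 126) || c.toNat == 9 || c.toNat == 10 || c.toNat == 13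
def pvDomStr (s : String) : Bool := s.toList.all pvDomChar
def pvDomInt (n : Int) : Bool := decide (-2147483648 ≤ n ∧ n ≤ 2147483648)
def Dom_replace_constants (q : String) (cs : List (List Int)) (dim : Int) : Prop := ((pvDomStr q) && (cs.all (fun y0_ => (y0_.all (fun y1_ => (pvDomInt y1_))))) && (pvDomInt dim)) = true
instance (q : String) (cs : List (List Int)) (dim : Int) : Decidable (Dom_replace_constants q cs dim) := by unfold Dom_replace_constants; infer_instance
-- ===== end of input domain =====

-- B replaces A's character-by-character scan (with a running constant index) by an
-- idiomatic split-on-'C' / render-blocks-with-join / interleave decomposition; same cost.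

-- ===== PORT A =====
def replace_constants (q : String) (cs : List (List Int)) (dim : Int) : String :=
  (q.toList.foldl (fun (st : String × Int) l =>
      if l == 'C' then
        let nq := st.1 ++ " [ "
        let nq := (PySem.List.pyRange 0 dim 1).foldl (fun nq j =>
        let nq := if j != 0 then nq ++ " , " else nq
        let v := PySem.List.pyGetD (PySem.List.pyGetD cs st.2 []) j 0
        if v == 2 then nq ++ " ? " else nq ++ PySem.Int.toStr v) nq
        (nq ++ " ] ", st.2 + 1)
      else (st.1 ++ l.toString, st.2)) ("", 0)).1

-- ===== PORT B =====
def replace_constants_alt (q : String) (cs : List (List Int)) (dim : Int) : String :=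
  let parts := (PySem.Str.split? q "C").getD [""]
  let n := parts.length - 1
  let blocks := (List.range n).map (fun (i : Nat) =>
    " [ " ++ PySem.Str.join " , " ((PySem.List.pyRange 0 dim 1).map (fun j =>
      let v := PySem.List.pyGetD (PySem.List.pyGetD cs (i : Int) []) j 0
      if v == 2 then " ? " else PySem.Int.toStr v)) ++ " ] ")
  let out := (List.range n).foldl (fun acc i => acc ++ [blocks.getD i "", parts.getD (i + 1) ""]) [parts.getD 0 ""]
  PySem.Str.join "" out

-- ===== PRECONDITION & SPEC =====
-- Pre_ excludes exactly the inputs on which the Python A raises IndexError: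
-- when dim > 0, more 'C' markers in q than rows in cs, or a used row shorter than dim.
def Pre_replace_constants (q : String) (cs : List (List Int)) (dim : Int) : Prop :=
  0 < dim → (q.toList.count 'C' ≤ cs.length ∧
    ∀ r ∈ cs.take (q.toList.count 'C'), dim ≤ (r.length : Int))
instance (q : String) (cs : List (List Int)) (dim : Int) : Decidable (Pre_replace_constants q cs dim) := by unfold Pre_replace_constants; infer_instance
def pvWitness_replace_constants : String × List (List Int) × Int := ("aCb", [[1, 2]], 2)

def Spec_replace_constants (q : String) (cs : List (List Int)) (dim : Int) (out : String) : Prop := out = replace_constants_alt q cs dim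
instance (q : String) (cs : List (List Int)) (dim : Int) (out : String) : Decidable (Spec_replace_constants q cs dim out) := by unfold Spec_replace_constants; infer_instance

-- ===== CLAIM (what is proved, stated in full; the proofs are below) =====
def Claim_equal_replace_constants : Prop := ∀ (q : String) (cs : List (List Int)) (dim : Int), Dom_replace_constants q cs dim → Pre_replace_constants q cs dim → Spec_replace_constants q cs dim (replace_constants q cs dim)

-- ===== LEMMAS AND PROOFS =====

-- one rendered value: " ? " for 2, otherwise its decimal string
def pvItm (cs : List (List Int)) (i j : Int) : String :=
  let v := PySem.List.pyGetD (PySem.List.pyGetD cs i []) j 0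
  if v == 2 then " ? " else PySem.Int.toStr v

-- one rendered block " [ v , … , v ] " for the i-th 'C'
def pvBlock (cs : List (List Int)) (dim i : Int) : String :=
  " [ " ++ PySem.Str.join " , " ((PySem.List.pyRange 0 dim 1).map (pvItm cs i)) ++ " ] "

-- recursive rendering of A's scan
def pvFA (cs : List (List Int)) (dim : Int) : List Char → Int → String
  | [], _ => ""
  | c :: r, i =>
    if c = 'C' then pvBlock cs dim i ++ pvFA cs dim r (i + 1)
    else c.toString ++ pvFA cs dim r i

-- structural split on 'C'
def pvSplit1 : List Char → List (List Char)
  | [] => [[]]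
  | c :: r =>
    if c = 'C' then [] :: pvSplit1 r
    else
      match pvSplit1 r with
      | [] => []
      | h :: t => (c :: h) :: t

-- interleave segments with blocks, block index starting at i
def pvHH (cs : List (List Int)) (dim : Int) : List (List Char) → Int → String
  | [], _ => ""
  | [p], _ => String.ofList p
  | p :: ps, i => String.ofList p ++ pvBlock cs dim i ++ pvHH cs dim ps (i + 1)

lemma pvOfList_cons (c : Char) (p : List Char) :
    String.ofList (c :: p) = c.toString ++ String.ofList p := by
  rw [← String.toList_inj]; simp

lemma pvSplit1_ne_nil (l : List Char) : pvSplit1 l ≠ [] := by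
  induction l with
  | nil => simp [pvSplit1]
  | cons c r ih =>
    by_cases hc : c = 'C'
    · simp [pvSplit1, hc]
    · cases h : pvSplit1 r with
      | nil => exact absurd h ih
      | cons a t => simp [pvSplit1, hc, h]

lemma pvGo_eq : ∀ (fuel : Nat) (l cur : List Char) (accs : List (List Char)),
    l.length < fuel →
    PySem.Chars.splitOn.go ['C'] fuel l cur accs =
      accs.reverse ++ ((cur.reverse ++ (pvSplit1 l).headI) :: (pvSplit1 l).tail) := by
  intro fuel
  induction fuel with
  | zero => intro l cur accs h; omega
  | succ f ih =>
    intro l cur accs h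
    cases l with
    | nil =>
      simp [PySem.Chars.splitOn.go, pvSplit1]
    | cons c rest =>
      have hlen : rest.length < f := by simpa using Nat.lt_of_succ_lt_succ h
      by_cases hc : c = 'C'
      · subst hc
        have hpre : List.isPrefixOf ['C'] ('C' :: rest) = true := by
          simp [List.isPrefixOf]
        simp only [PySem.Chars.splitOn.go, hpre, if_true, List.length_cons, List.length_nil,
          List.drop_succ_cons, List.drop_zero]
        rw [ih rest [] (cur.reverse :: accs) hlen]
        cases h' : pvSplit1 rest with
        | nil => exact absurd h' (pvSplit1_ne_nil rest)
        | cons a t => simp [pvSplit1, h']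
      · have hb : ('C' == c) = false := by
          simp [beq_eq_false_iff_ne]
          exact fun h => hc h.symm
        have hpre : List.isPrefixOf ['C'] (c :: rest) = false := by
          simp [List.isPrefixOf, hb]
        simp only [PySem.Chars.splitOn.go, hpre, Bool.false_eq_true, if_false]
        rw [ih rest (c :: cur) accs hlen]
        cases h' : pvSplit1 rest with
        | nil => exact absurd h' (pvSplit1_ne_nil rest)
        | cons a t => simp [pvSplit1, hc, h', List.append_assoc]

lemma pvSplitOn_eq (l : List Char) : PySem.Chars.splitOn l ['C'] = pvSplit1 l := by
  unfold PySem.Chars.splitOn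
  rw [pvGo_eq (l.length + 1) l [] [] (by omega)]
  cases h : pvSplit1 l with
  | nil => exact absurd h (pvSplit1_ne_nil l)
  | cons a t => simp

lemma pvJoin_append (sep : List Char) (xs : List (List Char)) (y : List Char) :
    PySem.Chars.join sep (xs ++ [y]) = if xs = [] then y else PySem.Chars.join sep xs ++ sep ++ y := by
  induction xs with
  | nil => simp [PySem.Chars.join_singleton]
  | cons x xs ih =>
    cases xs with
    | nil => simp [PySem.Chars.join_cons_cons, PySem.Chars.join_singleton]
    | cons z zs =>
      simp only [List.cons_append, PySem.Chars.join_cons_cons]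
      rw [show z :: (zs ++ [y]) = (z :: zs) ++ [y] from rfl, ih]
      simp [List.append_assoc]

lemma pvJoinS_append (sep : String) (xs : List String) (y : String) :
    PySem.Str.join sep (xs ++ [y]) = if xs = [] then y else PySem.Str.join sep xs ++ sep ++ y := by
  by_cases h : xs = []
  · subst h
    rw [← String.toList_inj]
    simp [PySem.Str.toList_join, PySem.Chars.join_singleton]
  · rw [if_neg h, ← String.toList_inj]
    simp [PySem.Str.toList_join, List.map_append, pvJoin_append, List.map_eq_nil_iff, h]

lemma pvJoinS_singleton (sep y : String) : PySem.Str.join sep [y] = y := by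
  rw [← String.toList_inj]
  simp [PySem.Str.toList_join, PySem.Chars.join_singleton]

lemma pvJoinS_nil (sep : String) : PySem.Str.join sep [] = "" := by
  rw [← String.toList_inj]
  simp [PySem.Str.toList_join, PySem.Chars.join_nil]

lemma pvJoin_empty_cons (x : String) (rest : List String) :
    PySem.Str.join "" (x :: rest) = x ++ PySem.Str.join "" rest := by
  rw [← String.toList_inj]
  cases rest with
  | nil =>
    simp [PySem.Str.toList_join, PySem.Chars.join_singleton, PySem.Chars.join_nil]
  | cons r rs =>
    simp [PySem.Str.toList_join, PySem.Chars.join_cons_cons]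

lemma pvStep_itm (cs : List (List Int)) (i : Int) (nq : String) (j : Int) :
    (if PySem.List.pyGetD (PySem.List.pyGetD cs i []) j 0 == 2 then nq ++ " ? "
     else nq ++ PySem.Int.toStr (PySem.List.pyGetD (PySem.List.pyGetD cs i []) j 0))
      = nq ++ pvItm cs i j := by
  by_cases h : PySem.List.pyGetD (PySem.List.pyGetD cs i []) j 0 == 2 <;> simp [pvItm, h]

lemma pvFold_sep (cs : List (List Int)) (i : Int) : ∀ (n : Nat) (a : String),
    (List.range n).foldl (fun nq (k : Nat) =>
        let j : Int := (k : Int)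
        let nq := if j != 0 then nq ++ " , " else nq
        let v := PySem.List.pyGetD (PySem.List.pyGetD cs i []) j 0
        if v == 2 then nq ++ " ? " else nq ++ PySem.Int.toStr v) a
      = a ++ PySem.Str.join " , " ((List.range n).map (fun (k : Nat) => pvItm cs i (k : Int))) := by
  intro n
  induction n with
  | zero =>
    intro a
    simp [pvJoinS_nil]
  | succ n ih =>
    intro a
    rw [List.range_succ, List.foldl_append, List.map_append, ih]
    simp only [List.foldl_cons, List.foldl_nil, List.map_cons, List.map_nil]
    rw [pvJoinS_append]
    by_cases hn : n = 0
    · subst hn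
      rw [pvStep_itm]
      simp [pvJoinS_nil]
    · have h1 : ((n : Int) != 0) = true := by simp [hn]
      have h2 : ¬ (List.range n).map (fun (k : Nat) => pvItm cs i (k : Int)) = [] := by
        simp [List.map_eq_nil_iff, List.range_eq_nil, hn]
      rw [pvStep_itm]
      simp [h1, h2, String.append_assoc]

lemma pvInner_eq (cs : List (List Int)) (dim : Int) (a : String) (i : Int) :
    ((PySem.List.pyRange 0 dim 1).foldl (fun nq j =>
        let nq := if j != 0 then nq ++ " , " else nq
        let v := PySem.List.pyGetD (PySem.List.pyGetD cs i []) j 0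
        if v == 2 then nq ++ " ? " else nq ++ PySem.Int.toStr v) (a ++ " [ ")) ++ " ] "
      = a ++ pvBlock cs dim i := by
  have h0 : (PySem.List.pyRange 0 dim 1).foldl (fun nq j =>
        let nq := if j != 0 then nq ++ " , " else nq
        let v := PySem.List.pyGetD (PySem.List.pyGetD cs i []) j 0
        if v == 2 then nq ++ " ? " else nq ++ PySem.Int.toStr v) (a ++ " [ ")
      = (a ++ " [ ") ++ PySem.Str.join " , " ((List.range dim.toNat).map (fun (k : Nat) => pvItm cs i (k : Int))) := by
    rw [PySem.List.pyRange_zero dim, List.foldl_map]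
    exact pvFold_sep cs i dim.toNat (a ++ " [ ")
  rw [h0]
  unfold pvBlock
  rw [PySem.List.pyRange_zero dim, List.map_map]
  have hcomp : (pvItm cs i ∘ fun (k : Nat) => (k : Int)) = fun (k : Nat) => pvItm cs i (k : Int) := rfl
  rw [hcomp]
  simp [String.append_assoc]

lemma pvA_fold (cs : List (List Int)) (dim : Int) : ∀ (l : List Char) (s : String) (i : Int),
    l.foldl (fun (st : String × Int) l =>
      if l == 'C' then
        let nq := st.1 ++ " [ "
        let nq := (PySem.List.pyRange 0 dim 1).foldl (fun nq j =>
        let nq := if j != 0 then nq ++ " , " else nq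
        let v := PySem.List.pyGetD (PySem.List.pyGetD cs st.2 []) j 0
        if v == 2 then nq ++ " ? " else nq ++ PySem.Int.toStr v) nq
        (nq ++ " ] ", st.2 + 1)
      else (st.1 ++ l.toString, st.2)) (s, i)
      = (s ++ pvFA cs dim l i, i + (l.count 'C' : Int)) := by
  intro l
  induction l with
  | nil =>
    intro s i
    simp [pvFA]
  | cons c r ih =>
    intro s i
    by_cases hc : c = 'C'
    · subst hc
      have h1 : List.foldl (fun (st : String × Int) l =>
      if l == 'C' then
        let nq := st.1 ++ " [ "
        let nq := (PySem.List.pyRange 0 dim 1).foldl (fun nq j =>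
        let nq := if j != 0 then nq ++ " , " else nq
        let v := PySem.List.pyGetD (PySem.List.pyGetD cs st.2 []) j 0
        if v == 2 then nq ++ " ? " else nq ++ PySem.Int.toStr v) nq
        (nq ++ " ] ", st.2 + 1)
      else (st.1 ++ l.toString, st.2)) (s, i) ('C' :: r)
          = List.foldl (fun (st : String × Int) l =>
      if l == 'C' then
        let nq := st.1 ++ " [ "
        let nq := (PySem.List.pyRange 0 dim 1).foldl (fun nq j =>
        let nq := if j != 0 then nq ++ " , " else nq
        let v := PySem.List.pyGetD (PySem.List.pyGetD cs st.2 []) j 0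
        if v == 2 then nq ++ " ? " else nq ++ PySem.Int.toStr v) nq
        (nq ++ " ] ", st.2 + 1)
      else (st.1 ++ l.toString, st.2)) (s ++ pvBlock cs dim i, i + 1) r := by
        show List.foldl (fun (st : String × Int) l =>
      if l == 'C' then
        let nq := st.1 ++ " [ "
        let nq := (PySem.List.pyRange 0 dim 1).foldl (fun nq j =>
        let nq := if j != 0 then nq ++ " , " else nq
        let v := PySem.List.pyGetD (PySem.List.pyGetD cs st.2 []) j 0
        if v == 2 then nq ++ " ? " else nq ++ PySem.Int.toStr v) nq
        (nq ++ " ] ", st.2 + 1)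
      else (st.1 ++ l.toString, st.2)) (((PySem.List.pyRange 0 dim 1).foldl (fun nq j =>
        let nq := if j != 0 then nq ++ " , " else nq
        let v := PySem.List.pyGetD (PySem.List.pyGetD cs i []) j 0
        if v == 2 then nq ++ " ? " else nq ++ PySem.Int.toStr v) (s ++ " [ ")) ++ " ] ", i + 1) r
          = List.foldl (fun (st : String × Int) l =>
      if l == 'C' then
        let nq := st.1 ++ " [ "
        let nq := (PySem.List.pyRange 0 dim 1).foldl (fun nq j =>
        let nq := if j != 0 then nq ++ " , " else nq
        let v := PySem.List.pyGetD (PySem.List.pyGetD cs st.2 []) j 0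
        if v == 2 then nq ++ " ? " else nq ++ PySem.Int.toStr v) nq
        (nq ++ " ] ", st.2 + 1)
      else (st.1 ++ l.toString, st.2)) (s ++ pvBlock cs dim i, i + 1) r
        rw [pvInner_eq cs dim s i]
      rw [h1, ih]
      have h2 : pvFA cs dim ('C' :: r) i = pvBlock cs dim i ++ pvFA cs dim r (i + 1) := by
        simp [pvFA]
      have h3 : ('C' :: r).count 'C' = r.count 'C' + 1 := by simp
      rw [h2, h3, Prod.mk.injEq]
      refine ⟨by rw [String.append_assoc], by push_cast; ring⟩
    · have hb : (c == 'C') = false := by simp [hc]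
      have h1 : List.foldl (fun (st : String × Int) l =>
      if l == 'C' then
        let nq := st.1 ++ " [ "
        let nq := (PySem.List.pyRange 0 dim 1).foldl (fun nq j =>
        let nq := if j != 0 then nq ++ " , " else nq
        let v := PySem.List.pyGetD (PySem.List.pyGetD cs st.2 []) j 0
        if v == 2 then nq ++ " ? " else nq ++ PySem.Int.toStr v) nq
        (nq ++ " ] ", st.2 + 1)
      else (st.1 ++ l.toString, st.2)) (s, i) (c :: r)
          = List.foldl (fun (st : String × Int) l =>
      if l == 'C' then
        let nq := st.1 ++ " [ "
        let nq := (PySem.List.pyRange 0 dim 1).foldl (fun nq j =>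
        let nq := if j != 0 then nq ++ " , " else nq
        let v := PySem.List.pyGetD (PySem.List.pyGetD cs st.2 []) j 0
        if v == 2 then nq ++ " ? " else nq ++ PySem.Int.toStr v) nq
        (nq ++ " ] ", st.2 + 1)
      else (st.1 ++ l.toString, st.2)) (s ++ c.toString, i) r := by
        rw [List.foldl_cons]
        simp [hb]
      rw [h1, ih]
      have h2 : pvFA cs dim (c :: r) i = c.toString ++ pvFA cs dim r i := by
        simp [pvFA, hc]
      have h3 : (c :: r).count 'C' = r.count 'C' := by
        simp [List.count_cons, hb]
      rw [h2, h3, Prod.mk.injEq]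
      exact ⟨by rw [String.append_assoc], rfl⟩

lemma pvFA_eq_hh (cs : List (List Int)) (dim : Int) : ∀ (l : List Char) (i : Int),
    pvFA cs dim l i = pvHH cs dim (pvSplit1 l) i := by
  intro l
  induction l with
  | nil =>
    intro i
    simp [pvFA, pvSplit1, pvHH]
  | cons c r ih =>
    intro i
    by_cases hc : c = 'C'
    · subst hc
      cases h : pvSplit1 r with
      | nil => exact absurd h (pvSplit1_ne_nil r)
      | cons a t =>
        simp [pvFA, pvSplit1, pvHH, h, ih]
    · cases h : pvSplit1 r with
      | nil => exact absurd h (pvSplit1_ne_nil r)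
      | cons a t =>
        cases t with
        | nil =>
          simp [pvFA, pvSplit1, pvHH, hc, h, ih, pvOfList_cons]
        | cons b t' =>
          simp [pvFA, pvSplit1, pvHH, hc, h, ih, pvOfList_cons, String.append_assoc]

lemma pvJ (cs : List (List Int)) (dim : Int) : ∀ (t : List (List Char)) (p0 : List Char) (off : Nat),
    PySem.Str.join "" (String.ofList p0 ::
        (List.range t.length).flatMap (fun (i : Nat) =>
          [pvBlock cs dim ((off : Int) + (i : Int)), String.ofList (t.getD i [])]))
      = pvHH cs dim (p0 :: t) (off : Int) := by
  intro t
  induction t with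
  | nil =>
    intro p0 off
    simp [pvHH, pvJoinS_singleton]
  | cons q0 qs ih =>
    intro p0 off
    rw [show (q0 :: qs).length = qs.length + 1 from rfl, List.range_succ_eq_map, List.flatMap_cons]
    rw [List.flatMap_def, List.map_map, ← List.flatMap_def]
    have hstep : ((fun (i : Nat) =>
          [pvBlock cs dim ((off : Int) + (i : Int)), String.ofList ((q0 :: qs).getD i [])]) ∘ Nat.succ)
        = fun (i : Nat) => [pvBlock cs dim (((off + 1 : Nat) : Int) + (i : Int)), String.ofList (qs.getD i [])] := by
      funext i
      simp only [Function.comp_apply, Nat.succ_eq_add_one, List.getD_cons_succ]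
      have : ((off : Int) + ((i + 1 : Nat) : Int)) = (((off + 1 : Nat) : Int) + (i : Int)) := by
        push_cast; ring
      rw [this]
    rw [hstep]
    simp only [Nat.cast_zero, add_zero, List.getD_cons_zero, List.cons_append, List.nil_append]
    rw [pvJoin_empty_cons, pvJoin_empty_cons]
    rw [ih q0 (off + 1)]
    rw [show ((off + 1 : Nat) : Int) = (off : Int) + 1 by push_cast; ring]
    simp [pvHH, String.append_assoc]

lemma pvJ0 (cs : List (List Int)) (dim : Int) (t : List (List Char)) (p0 : List Char) :
    PySem.Str.join "" (String.ofList p0 ::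
        (List.range t.length).flatMap (fun (i : Nat) =>
          [pvBlock cs dim (i : Int), String.ofList (t.getD i [])]))
      = pvHH cs dim (p0 :: t) 0 := by
  have h := pvJ cs dim t p0 0
  simpa using h

lemma pvB_eq (q : String) (cs : List (List Int)) (dim : Int) :
    replace_constants_alt q cs dim = pvHH cs dim (PySem.Chars.splitOn q.toList ['C']) 0 := by
  obtain ⟨a, t, hst⟩ : ∃ a t, PySem.Chars.splitOn q.toList ['C'] = a :: t := by
    rw [pvSplitOn_eq]
    cases h : pvSplit1 q.toList with
    | nil => exact absurd h (pvSplit1_ne_nil _)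
    | cons a t => exact ⟨a, t, rfl⟩
  have hC : ("C" : String).toList = ['C'] := rfl
  have hsplit : (PySem.Str.split? q "C").getD [""] = String.ofList a :: t.map String.ofList := by
    simp [PySem.Str.split?, PySem.Chars.split?, hC, hst]
  show PySem.Str.join ""
      ((List.range (((PySem.Str.split? q "C").getD [""]).length - 1)).foldl
        (fun acc i => acc ++
          [((List.range (((PySem.Str.split? q "C").getD [""]).length - 1)).map (fun (i : Nat) =>
            " [ " ++ PySem.Str.join " , " ((PySem.List.pyRange 0 dim 1).map (fun j =>
              let v := PySem.List.pyGetD (PySem.List.pyGetD cs (i : Int) []) j 0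
              if v == 2 then " ? " else PySem.Int.toStr v)) ++ " ] ")).getD i "",
           ((PySem.Str.split? q "C").getD [""]).getD (i + 1) ""])
        [((PySem.Str.split? q "C").getD [""]).getD 0 ""])
      = pvHH cs dim (PySem.Chars.splitOn q.toList ['C']) 0
  rw [hsplit]
  have hlen : (String.ofList a :: t.map String.ofList).length - 1 = t.length := by simp
  rw [hlen]
  rw [PySem.List.foldl_append_eq_flatMap]
  rw [List.getD_cons_zero, List.singleton_append]
  have hflat : (List.range t.length).flatMap (fun i =>
        [((List.range t.length).map (fun (i : Nat) =>
          " [ " ++ PySem.Str.join " , " ((PySem.List.pyRange 0 dim 1).map (fun j =>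
            let v := PySem.List.pyGetD (PySem.List.pyGetD cs (i : Int) []) j 0
            if v == 2 then " ? " else PySem.Int.toStr v)) ++ " ] ")).getD i "",
         (String.ofList a :: t.map String.ofList).getD (i + 1) ""])
      = (List.range t.length).flatMap (fun (i : Nat) =>
        [pvBlock cs dim (i : Int), String.ofList (t.getD i [])]) := by
    rw [List.flatMap_def, List.flatMap_def]
    refine congrArg List.flatten (List.map_congr_left ?_)
    intro i hi
    rw [List.mem_range] at hi
    have hb1 : ((List.range t.length).map (fun (i : Nat) =>
        " [ " ++ PySem.Str.join " , " ((PySem.List.pyRange 0 dim 1).map (fun j =>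
          let v := PySem.List.pyGetD (PySem.List.pyGetD cs (i : Int) []) j 0
          if v == 2 then " ? " else PySem.Int.toStr v)) ++ " ] ")).getD i ""
        = pvBlock cs dim (i : Int) := by
      rw [List.getD_eq_getElem?_getD, List.getElem?_map, List.getElem?_range hi]
      rfl
    have hb2 : (String.ofList a :: t.map String.ofList).getD (i + 1) "" = String.ofList (t.getD i []) := by
      rw [List.getD_cons_succ, List.getD_eq_getElem?_getD, List.getElem?_map,
        List.getElem?_eq_getElem hi]
      simp [List.getD_eq_getElem?_getD, List.getElem?_eq_getElem hi]
    rw [hb1, hb2]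
  rw [hflat, hst]
  exact pvJ0 cs dim t a

-- ===== VERDICT (by name: the statement is the Claim_ definition above) =====
theorem replace_constants_spec : Claim_equal_replace_constants := by
  intro q cs dim _ _
  unfold Spec_replace_constants replace_constants
  rw [pvA_fold cs dim q.toList "" 0]
  show "" ++ pvFA cs dim q.toList 0 = replace_constants_alt q cs dim
  rw [String.empty_append, pvFA_eq_hh, pvB_eq, pvSplitOn_eq]
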